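-- pv_equiv track=rewrite | github.com/van-appears/adventure-iteration | version13/base/action_parser.py | parse_action
-- ===== SOURCE A (Python) =====
-- SYNONYMS = {
--     "move to": ["move to", "head to", "go to", "walk to", "run to", "enter"],
--     "move": ["move", "head", "go", "walk", "run"],
--     "break": ["break", "smash"],
--     "take": ["take", "get", "collect", "pick up"],
--     "open": ["open", "unlock"],
--     "attack": ["attack", "kick", "punch", "fight"],
--     "pet": ["pet", "stroke", "cuddle", "pat"],
--     "consume": ["consume", "eat", "drink"],
--     "give": ["give", "drop"],
--     "throw": ["throw"],
--     "read": ["read"],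
--     "find": ["find", "locate"],
--     "light": ["light", "strike"],
--     "describe": ["describe", "look", "examine"],
--     "quit": ["quit", "exit"]
-- }
--
-- def parse_action(action_string):
--     action_string = action_string.strip().lower()
--     for parent_verb, synonym_verbs in SYNONYMS.items():
--         for synonym in synonym_verbs:
--             if action_string.startswith(f"{synonym} ") or action_string == synonym:
--                 noun = action_string[len(synonym)::].strip()
--                 if len(noun) == 0:
--                     return (parent_verb, None)
--                 return (parent_verb, noun)
--     return (action_string, None)
-- ===== SOURCE B (Python) =====
-- SYNONYMS = {
--     "move to": ["move to", "head to", "go to", "walk to", "run to", "enter"],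
--     "move": ["move", "head", "go", "walk", "run"],
--     "break": ["break", "smash"],
--     "take": ["take", "get", "collect", "pick up"],
--     "open": ["open", "unlock"],
--     "attack": ["attack", "kick", "punch", "fight"],
--     "pet": ["pet", "stroke", "cuddle", "pat"],
--     "consume": ["consume", "eat", "drink"],
--     "give": ["give", "drop"],
--     "throw": ["throw"],
--     "read": ["read"],
--     "find": ["find", "locate"],
--     "light": ["light", "strike"],
--     "describe": ["describe", "look", "examine"],
--     "quit": ["quit", "exit"]
-- }
--
-- SYN_TO_VERB = {syn: parent for parent, syns in SYNONYMS.items() for syn in syns}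
--
-- def parse_action(action_string):
--     s = action_string.strip().lower()
--     i = s.find(' ')
--     if i == -1:
--         cands = [s]
--     else:
--         j = s.find(' ', i + 1)
--         cands = [s if j == -1 else s[:j], s[:i]]
--     for cand in cands:
--         verb = SYN_TO_VERB.get(cand)
--         if verb is not None:
--             noun = s[len(cand):].strip()
--             return (verb, noun if noun else None)
--     return (s, None)
-- ===== Notes on version B (the rewrite author's own statement) =====
-- stated objective: idiomatic
-- what changed: Replaces A's nested scan over all 40 synonyms (prefix-testing each against the input) by a synonym->verb dictionary built once, probed with at most two candidates cut from the input at its first and second space.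
import Mathlib
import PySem

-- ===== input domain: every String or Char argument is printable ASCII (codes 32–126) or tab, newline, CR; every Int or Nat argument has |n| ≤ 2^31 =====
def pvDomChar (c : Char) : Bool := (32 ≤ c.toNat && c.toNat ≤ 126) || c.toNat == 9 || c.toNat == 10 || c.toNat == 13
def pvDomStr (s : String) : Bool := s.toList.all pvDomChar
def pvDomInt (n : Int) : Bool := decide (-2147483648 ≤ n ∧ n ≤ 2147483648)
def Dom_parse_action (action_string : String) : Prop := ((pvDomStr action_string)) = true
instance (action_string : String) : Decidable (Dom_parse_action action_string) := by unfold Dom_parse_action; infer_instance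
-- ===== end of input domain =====

-- B replaces A's scan over all 40 synonyms by one precomputed synonym->verb dictionary probed with
-- at most two word-boundary prefixes (up to the first/second space) of the input: a more idiomatic
-- table-driven parse with the same exact behaviour.

-- ===== PORT A =====
def pvSynonyms : List (String × List String) := [("move to", ["move to","head to","go to","walk to","run to","enter"]), ("move", ["move","head","go","walk","run"]), ("break",["break","smash"]), ("take",["take","get","collect","pick up"]), ("open",["open","unlock"]), ("attack",["attack","kick","punch","fight"]), ("pet",["pet","stroke","cuddle","pat"]), ("consume",["consume","eat","drink"]), ("give",["give","drop"]), ("throw",["throw"]), ("read",["read"]), ("find",["find","locate"]), ("light",["light","strike"]), ("describe",["describe","look","examine"]), ("quit",["quit","exit"])]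

def pvParseInner (s parent : String) : List String → Option (String × Option String)
  | [] => none
  | synonym :: rest =>
    if PySem.Str.startswith s (synonym ++ " ") || s == synonym then
      let noun := PySem.Str.strip (PySem.Str.slice s (some (PySem.Str.len synonym)) none)
      if PySem.Str.len noun == 0 then some (parent, none) else some (parent, some noun)
    else pvParseInner s parent rest

def pvParseOuter (s : String) : List (String × List String) → String × Option String
  | [] => (s, none)
  | (parent, syns) :: rest =>
    match pvParseInner s parent syns with
    | some r => r
    | none => pvParseOuter s rest

def parse_action (action_string : String) : String × Option String :=
  let s := PySem.Str.lower (PySem.Str.strip action_string)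
  pvParseOuter s pvSynonyms


-- ===== PORT B =====
def pvSynToVerb : PySem.Dict String String :=
  pvSynonyms.foldl (fun d pv => pv.2.foldl (fun d syn => d.insert syn pv.1) d) PySem.Dict.empty

def pvLookupLoop (s : String) : List String → String × Option String
  | [] => (s, none)
  | cand :: rest =>
    match pvSynToVerb.get? cand with
    | some verb =>
      let noun := PySem.Str.strip (PySem.Str.slice s (some (PySem.Str.len cand)) none)
      (verb, if noun == "" then none else some noun)
    | none => pvLookupLoop s rest

def parse_action_alt (action_string : String) : String × Option String :=
  let s := PySem.Str.lower (PySem.Str.strip action_string)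
  let i := PySem.Str.find s " "
  let cands := if i == -1 then [s]
    else
      let j := PySem.Str.findFrom s " " (i + 1)
      [if j == -1 then s else PySem.Str.slice s none (some j), PySem.Str.slice s none (some i)]
  pvLookupLoop s cands



-- ===== PRECONDITION & SPEC =====
def Spec_parse_action (action_string : String) (out : String × Option String) : Prop := out = parse_action_alt action_string
instance (action_string : String) (out : String × Option String) : Decidable (Spec_parse_action action_string out) := by unfold Spec_parse_action; infer_instance

-- ===== CLAIM (what is proved, stated in full; the proofs are below) =====
def Claim_equal_parse_action : Prop := ∀ (action_string : String), Dom_parse_action action_string → Spec_parse_action action_string (parse_action action_string)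

-- ===== LEMMAS AND PROOFS =====
def pvFlat : List (String × String) := pvSynonyms.flatMap (fun pv => pv.2.map (fun syn => (pv.1, syn)))
def pvTestA (s t : String) : Bool := PySem.Str.startswith s (t ++ " ") || s == t
def pvNoun (s c : String) : String := PySem.Str.strip (PySem.Str.slice s (some (PySem.Str.len c)) none)
def pvRet (s verb c : String) : String × Option String := (verb, if pvNoun s c == "" then none else some (pvNoun s c))
def pvScanF (s : String) (test : String → Bool) : List (String × String) → (String × Option String) → String × Option String
  | [], fb => fb
  | (parent, t) :: rest, fb =>
    if test t then
      if PySem.Str.len (pvNoun s t) == 0 then (parent, none) else (parent, some (pvNoun s t))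
    else pvScanF s test rest fb
def pvAssoc (c : String) : List (String × String) → Option String
  | [] => none
  | (parent, t) :: rest => if t == c then some parent else pvAssoc c rest

lemma beq_toList (s t : String) : (s == t) = (s.toList == t.toList) := by
  rw [Bool.eq_iff_iff]; simp [String.toList_inj]

lemma lenZeroEq (x : String) : (PySem.Str.len x == 0) = (x == "") := by
  rw [Bool.eq_iff_iff, beq_toList]
  simp [PySem.Str.len_eq]

lemma pvRetEq (s p c : String) :
    (if PySem.Str.len (pvNoun s c) == 0 then (p, (none : Option String)) else (p, some (pvNoun s c))) = pvRet s p c := by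
  rw [pvRet, lenZeroEq]; split_ifs <;> rfl

lemma dictmk_assoc (c : String) : ∀ pairs : List (String × String),
    (PySem.Dict.mk (pairs.map (fun p => (p.2, p.1)))).get? c = pvAssoc c pairs := by
  intro pairs
  induction pairs with
  | nil => rfl
  | cons p r ih =>
    obtain ⟨a, b⟩ := p
    rw [List.map_cons, PySem.Dict.get?_mk_cons, pvAssoc, ih]

set_option maxRecDepth 8192 in
lemma synToVerb_lit : pvSynToVerb = PySem.Dict.mk (pvFlat.map (fun p => (p.2, p.1))) := by decide

lemma get?_eq_assoc (c : String) : pvSynToVerb.get? c = pvAssoc c pvFlat := by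
  rw [synToVerb_lit, dictmk_assoc]

set_option maxRecDepth 8192 in
lemma lookup_cons (s c : String) (rest : List String) :
    pvLookupLoop s (c :: rest) = match pvAssoc c pvFlat with
      | some v => pvRet s v c
      | none => pvLookupLoop s rest := by
  rw [show pvLookupLoop s (c :: rest) = (match pvSynToVerb.get? c with
      | some v => pvRet s v c
      | none => pvLookupLoop s rest) from rfl, get?_eq_assoc]

lemma scanF_congr (s : String) (t1 t2 : String → Bool) :
    ∀ (pairs : List (String × String)) (fb : String × Option String), (∀ p ∈ pairs, t1 p.2 = t2 p.2) →
    pvScanF s t1 pairs fb = pvScanF s t2 pairs fb := by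
  intro pairs
  induction pairs with
  | nil => intro _ _; rfl
  | cons p r ih =>
    intro fb h
    obtain ⟨a, b⟩ := p
    rw [pvScanF, pvScanF, h ⟨a, b⟩ List.mem_cons_self, ih fb (fun q hq => h q (List.mem_cons_of_mem _ hq))]

lemma assoc_none (c : String) : ∀ pairs : List (String × String),
    pvAssoc c pairs = none → ∀ p ∈ pairs, (p.2 == c) = false := by
  intro pairs
  induction pairs with
  | nil => intro _ p hp; cases hp
  | cons q r ih =>
    obtain ⟨a, b⟩ := q
    intro h p hp
    rw [pvAssoc] at h
    by_cases hb : (b == c) = true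
    · rw [if_pos hb] at h; cases h
    · rw [if_neg hb] at h
      rcases List.mem_cons.mp hp with rfl | hm
      · simpa using hb
      · exact ih h p hm

lemma assoc_some_mem (c v : String) : ∀ pairs : List (String × String),
    pvAssoc c pairs = some v → (v, c) ∈ pairs := by
  intro pairs
  induction pairs with
  | nil => intro h; cases h
  | cons q r ih =>
    obtain ⟨a, b⟩ := q
    intro h
    rw [pvAssoc] at h
    by_cases hb : (b == c) = true
    · rw [if_pos hb] at h
      obtain rfl : a = v := by cases h; rfl
      obtain rfl : b = c := by simpa using hb
      exact List.mem_cons_self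
    · rw [if_neg hb] at h
      exact List.mem_cons_of_mem _ (ih h)

lemma scan_eq_lookup (s c : String) (test : String → Bool) : ∀ pairs : List (String × String),
    (∀ p ∈ pairs, test p.2 = (p.2 == c)) →
    pvScanF s test pairs (s, none) = (match pvAssoc c pairs with
      | some v => pvRet s v c
      | none => (s, none)) := by
  intro pairs
  induction pairs with
  | nil => intro _; rfl
  | cons q r ih =>
    obtain ⟨a, b⟩ := q
    intro h
    have hh := h ⟨a, b⟩ List.mem_cons_self
    by_cases hb : b = c
    · subst hb
      simp only [pvScanF, pvAssoc, hh, beq_self_eq_true, if_true]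
      exact pvRetEq s a b
    · have hb2 : (b == c) = false := beq_eq_false_iff_ne.mpr hb
      simp only [pvScanF, pvAssoc, hh, hb2, Bool.false_eq_true, if_false]
      exact ih (fun q hq => h q (List.mem_cons_of_mem _ hq))

lemma scanF_append (s : String) (test : String → Bool) :
    ∀ (l1 l2 : List (String × String)) (fb : String × Option String),
    pvScanF s test (l1 ++ l2) fb = pvScanF s test l1 (pvScanF s test l2 fb) := by
  intro l1
  induction l1 with
  | nil => intro l2 fb; rfl
  | cons p r ih =>
    intro l2 fb
    obtain ⟨a, b⟩ := p
    rw [List.cons_append, pvScanF, pvScanF]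
    by_cases ht : test b = true
    · rw [if_pos ht, if_pos ht]
    · rw [if_neg ht, if_neg ht, ih]

lemma inner_cons_pos (s parent syn : String) (ss : List String) (h : pvTestA s syn = true) :
    pvParseInner s parent (syn :: ss) =
      some (if PySem.Str.len (pvNoun s syn) == 0 then (parent, none) else (parent, some (pvNoun s syn))) := by
  rw [pvParseInner, if_pos (show (PySem.Str.startswith s (syn ++ " ") || s == syn) = true from h)]
  exact (apply_ite some _ _ _).symm

lemma inner_cons_neg (s parent syn : String) (ss : List String) (h : pvTestA s syn = false) :
    pvParseInner s parent (syn :: ss) = pvParseInner s parent ss := by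
  rw [pvParseInner,
    if_neg (show ¬ (PySem.Str.startswith s (syn ++ " ") || s == syn) = true from by
      rw [show (PySem.Str.startswith s (syn ++ " ") || s == syn) = false from h]
      exact Bool.false_ne_true)]

lemma scanF_cons_pos (s : String) (test : String → Bool) (p t : String) (r : List (String × String))
    (fb : String × Option String) (h : test t = true) :
    pvScanF s test ((p, t) :: r) fb =
      (if PySem.Str.len (pvNoun s t) == 0 then (p, none) else (p, some (pvNoun s t))) := by
  rw [pvScanF, if_pos h]

lemma scanF_cons_neg (s : String) (test : String → Bool) (p t : String) (r : List (String × String))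
    (fb : String × Option String) (h : test t = false) :
    pvScanF s test ((p, t) :: r) fb = pvScanF s test r fb := by
  rw [pvScanF, if_neg (by rw [h]; exact Bool.false_ne_true)]

lemma inner_eq (s parent : String) : ∀ (syns : List String) (fb : String × Option String),
    (match pvParseInner s parent syns with | some r => r | none => fb) =
    pvScanF s (pvTestA s) (syns.map (fun syn => (parent, syn))) fb := by
  intro syns
  induction syns with
  | nil => intro fb; rfl
  | cons syn ss ih =>
    intro fb
    rcases Bool.eq_false_or_eq_true (pvTestA s syn) with ht | ht
    · rw [List.map_cons, inner_cons_pos s parent syn ss ht, scanF_cons_pos s (pvTestA s) parent syn _ fb ht]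
    · rw [List.map_cons, inner_cons_neg s parent syn ss ht, scanF_cons_neg s (pvTestA s) parent syn _ fb ht]
      exact ih fb

lemma outer_eq_scan (s : String) : ∀ items : List (String × List String),
    pvParseOuter s items = pvScanF s (pvTestA s)
      (items.flatMap (fun pv => pv.2.map (fun syn => (pv.1, syn)))) (s, none) := by
  intro items
  induction items with
  | nil => rfl
  | cons pv rest ih =>
    obtain ⟨parent, syns⟩ := pv
    rw [pvParseOuter, List.flatMap_cons, scanF_append, ← ih, inner_eq]

lemma parseA_eq_scan (s : String) : pvParseOuter s pvSynonyms = pvScanF s (pvTestA s) pvFlat (s, none) :=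
  outer_eq_scan s pvSynonyms

lemma fsu : ∀ {u w a b : List Char}, ' ' ∉ u → ' ' ∉ w → u ++ ' ' :: a = w ++ ' ' :: b → u = w ∧ a = b := by
  intro u
  induction u with
  | nil =>
    intro w a b _ hw h
    cases w with
    | nil => simpa using h
    | cons d w' =>
      simp only [List.nil_append, List.cons_append, List.cons.injEq] at h
      exact absurd (show ' ' ∈ d :: w' by rw [h.1]; exact List.mem_cons_self) hw
  | cons c u' ih =>
    intro w a b hu hw h
    cases w with
    | nil =>
      simp only [List.cons_append, List.nil_append, List.cons.injEq] at h
      exact absurd (show ' ' ∈ c :: u' by rw [← h.1]; exact List.mem_cons_self) hu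
    | cons d w' =>
      simp only [List.cons_append, List.cons.injEq] at h
      obtain ⟨rfl, h2⟩ := h
      obtain ⟨rfl, rfl⟩ := ih (fun hm => hu (List.mem_cons_of_mem _ hm)) (fun hm => hw (List.mem_cons_of_mem _ hm)) h2
      exact ⟨rfl, rfl⟩

lemma fsp2 {u v w rest : List Char} (hu : ' ' ∉ u) (hw : ' ' ∉ w)
    (h : (u ++ ' ' :: v) <+: (w ++ ' ' :: rest)) : u = w ∧ v <+: rest := by
  obtain ⟨tail, htail⟩ := h
  rw [List.append_assoc, List.cons_append] at htail
  obtain ⟨rfl, h2⟩ := fsu hu hw htail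
  exact ⟨rfl, ⟨tail, h2⟩⟩

lemma sw_iff (s t : String) : PySem.Str.startswith s t = true ↔ t.toList <+: s.toList := by
  rw [PySem.Str.startswith_eq]; exact PySem.Chars.startswith_iff _ _

lemma toList_append_space (t : String) : (t ++ " ").toList = t.toList ++ [' '] := by
  rw [String.toList_append]
  norm_num [show (" " : String).toList = [' '] from by decide]

lemma key_none (s : String) (hsp : ' ' ∉ s.toList) (t : String) : pvTestA s t = (t == s) := by
  have hsw : PySem.Str.startswith s (t ++ " ") = false := by
    rcases Bool.eq_false_or_eq_true (PySem.Str.startswith s (t ++ " ")) with h | h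
    · exact absurd (((sw_iff s (t ++ " ")).mp h).subset (by rw [toList_append_space]; simp)) hsp
    · exact h
  rw [pvTestA, hsw, Bool.false_or, Bool.beq_comm]

def pvOneW (t : String) : Bool := decide (t.toList ≠ []) && decide (' ' ∉ t.toList)

def pvTwoW (t : String) : Bool :=
  decide (t.toList.dropWhile (· ≠ ' ') ≠ []) &&
  decide (' ' ∉ (t.toList.dropWhile (· ≠ ' ')).tail) &&
  decide ((t.toList.dropWhile (· ≠ ' ')).tail ≠ [])

lemma twoW_elim (t : String) (h : pvTwoW t = true) :
    ∃ u v, t.toList = u ++ ' ' :: v ∧ ' ' ∉ u ∧ ' ' ∉ v ∧ v ≠ [] := by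
  rw [pvTwoW] at h
  simp only [Bool.and_eq_true, decide_eq_true_eq] at h
  obtain ⟨⟨h1, h2⟩, h3⟩ := h
  refine ⟨t.toList.takeWhile (· ≠ ' '), (t.toList.dropWhile (· ≠ ' ')).tail, ?_, ?_, h2, h3⟩
  · have hh : (t.toList.dropWhile (· ≠ ' ')).head h1 = ' ' := by
      have := List.head_dropWhile_not (p := (· ≠ ' ')) h1
      simpa using this
    have hd : t.toList.dropWhile (· ≠ ' ') = ' ' :: (t.toList.dropWhile (· ≠ ' ')).tail := by
      have h4 := List.cons_head_tail h1
      rw [hh] at h4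
      exact h4.symm
    conv_lhs => rw [← List.takeWhile_append_dropWhile (p := (· ≠ ' ')) (l := t.toList), hd]
  · intro hm
    have := List.mem_takeWhile_imp hm
    simp at this

lemma pvClass : ∀ p ∈ pvFlat, (pvOneW p.2 || pvTwoW p.2) = true := by decide

lemma key_two (s c1 c2 : String) (w1 mid suf : List Char)
    (hw1 : ' ' ∉ w1) (hmid : ' ' ∉ mid)
    (hc1 : c1.toList = w1) (hc2 : c2.toList = w1 ++ ' ' :: mid)
    (hcs : s.toList = w1 ++ ' ' :: suf)
    (hAB : suf = mid ∨ ∃ suf2, suf = mid ++ ' ' :: suf2)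
    (t : String) (hcl : (pvOneW t || pvTwoW t) = true) : pvTestA s t = (t == c1 || t == c2) := by
  have hspace : ' ' ∈ s.toList := by rw [hcs]; simp
  rcases (by simpa using hcl : pvOneW t = true ∨ pvTwoW t = true) with h1 | h2
  · -- one-word t
    rw [pvOneW] at h1
    simp only [Bool.and_eq_true, decide_eq_true_eq] at h1
    obtain ⟨hne, hns⟩ := h1
    have ha : (s == t) = false := by
      refine beq_eq_false_iff_ne.mpr fun hst => hns ?_
      rw [← hst]; exact hspace
    have hb : (t == c2) = false := by
      refine beq_eq_false_iff_ne.mpr fun hst => hns ?_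
      rw [hst, hc2]; simp
    have hc : PySem.Str.startswith s (t ++ " ") = (t == c1) := by
      rw [Bool.eq_iff_iff, sw_iff, toList_append_space, beq_iff_eq]
      constructor
      · intro hpre
        rw [hcs] at hpre
        have := fsp2 (v := []) hns hw1 (by simpa using hpre)
        apply String.toList_inj.mp
        rw [this.1, hc1]
      · intro hteq
        rw [hteq, hc1, hcs]
        exact ⟨suf, by simp⟩
    rw [pvTestA, hc, ha, hb, Bool.or_false]
  · -- two-word t
    obtain ⟨u, v, huv, hu, hv, hvne⟩ := twoW_elim t h2
    have ha : (t == c1) = false := by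
      refine beq_eq_false_iff_ne.mpr fun hst => ?_
      have : ' ' ∈ c1.toList := by rw [← hst, huv]; simp
      rw [hc1] at this
      exact hw1 this
    rcases hAB with rfl | ⟨suf2, rfl⟩
    · -- suf = mid, c2 = whole string
      have hsc2 : s.toList = c2.toList := by rw [hcs, hc2]
      have hse : (s == t) = (t == c2) := by
        rw [Bool.eq_iff_iff, beq_iff_eq, beq_iff_eq]
        constructor
        · intro h; apply String.toList_inj.mp; rw [← h, hsc2]
        · intro h; apply String.toList_inj.mp; rw [h, hsc2]
      have hsw : PySem.Str.startswith s (t ++ " ") = false := by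
        rcases Bool.eq_false_or_eq_true (PySem.Str.startswith s (t ++ " ")) with h | h
        · exfalso
          have hpre := (sw_iff _ _).mp h
          rw [toList_append_space, hcs, huv, List.append_assoc, List.cons_append] at hpre
          have := (fsp2 hu hw1 hpre).2
          exact hmid (this.subset (by simp))
        · exact h
      rw [pvTestA, hsw, Bool.false_or, hse, ha, Bool.false_or]
    · -- suf = mid ++ ' ' :: suf2
      have ha2 : (s == t) = false := by
        refine beq_eq_false_iff_ne.mpr fun hst => ?_
        have heq : u ++ ' ' :: v = w1 ++ ' ' :: (mid ++ ' ' :: suf2) := by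
          rw [← huv, ← hst, hcs]
        have := (fsu hu hw1 heq).2
        exact hv (this ▸ (by simp : ' ' ∈ mid ++ ' ' :: suf2))
      have hsw : PySem.Str.startswith s (t ++ " ") = (t == c2) := by
        rw [Bool.eq_iff_iff, sw_iff, toList_append_space, beq_iff_eq]
        constructor
        · intro hpre
          rw [hcs, huv, List.append_assoc, List.cons_append] at hpre
          obtain ⟨rfl, hpre2⟩ := fsp2 hu hw1 hpre
          have hveq : v = mid := by
            have := fsp2 (u := v) (v := []) hv hmid (by simpa using hpre2)
            exact this.1
          apply String.toList_inj.mp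
          rw [huv, hc2, hveq]
        · intro hteq
          rw [hteq, hc2, hcs, List.append_assoc, List.cons_append]
          apply (List.prefix_append_right_inj w1).mpr
          simp
      rw [pvTestA, hsw, ha2, Bool.or_false, ha, Bool.false_or]

lemma scan_eq_find (s : String) (test : String → Bool) : ∀ pairs : List (String × String),
    pvScanF s test pairs (s, none) = (match pairs.find? (fun p => test p.2) with
      | some (parent, t) =>
        if PySem.Str.len (pvNoun s t) == 0 then (parent, none) else (parent, some (pvNoun s t))
      | none => (s, none)) := by
  intro pairs
  induction pairs with
  | nil => rfl
  | cons q r ih =>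
    obtain ⟨a, b⟩ := q
    rcases Bool.eq_false_or_eq_true (test b) with ht | ht
    · rw [scanF_cons_pos s test a b r _ ht, List.find?_cons_of_pos (by simpa using ht)]
    · rw [scanF_cons_neg s test a b r _ ht, List.find?_cons_of_neg (by simpa using ht), ih]

lemma split_at_first_space (l : List Char) (hsp : ' ' ∈ l) :
    ∃ (n : Nat) (suf : List Char), PySem.Chars.find l [' '] = (n : Int) ∧
      l = l.take n ++ ' ' :: suf ∧ ' ' ∉ l.take n ∧ suf = l.drop (n + 1) ∧ n < l.length := by
  have hinf : [' '] <:+: l := (List.singleton_infix_iff _ _).mpr hsp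
  have hnn : 0 ≤ PySem.Chars.find l [' '] := (PySem.Chars.find_nonneg_iff _ _).mpr hinf
  obtain ⟨n, hn⟩ : ∃ n : Nat, PySem.Chars.find l [' '] = (n : Int) :=
    ⟨_, (Int.toNat_of_nonneg hnn).symm⟩
  have hspec := PySem.Chars.find_spec (s := l) (sub := [' ']) hnn
  rw [hn] at hspec
  simp only [Int.toNat_natCast] at hspec
  obtain ⟨⟨tl, htl⟩, hmin⟩ := hspec
  have hdropn : l.drop n = ' ' :: tl := by simpa using htl.symm
  have hlen : n < l.length := by
    by_contra hc
    rw [List.drop_eq_nil_of_le (by omega)] at hdropn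
    cases hdropn
  refine ⟨n, tl, hn, ?_, ?_, ?_, hlen⟩
  · conv_lhs => rw [← List.take_append_drop n l, hdropn]
  · intro hmem
    obtain ⟨k, hklt, hkeq⟩ := List.mem_iff_getElem.mp hmem
    rw [List.length_take] at hklt
    have hkn : k < n := lt_of_lt_of_le hklt (min_le_left _ _)
    have hkl : k < l.length := by omega
    rw [List.getElem_take] at hkeq
    refine hmin k hkn ⟨l.drop (k + 1), ?_⟩
    rw [← hkeq, List.singleton_append, ← List.drop_eq_getElem_cons]
  · have := congrArg List.tail hdropn
    rw [List.tail_drop] at this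
    simpa using this.symm

lemma case2_main (s c1 c2 : String) (w1 mid suf : List Char)
    (hw1 : ' ' ∉ w1) (hmid : ' ' ∉ mid)
    (hc1 : c1.toList = w1) (hc2 : c2.toList = w1 ++ ' ' :: mid)
    (hcs : s.toList = w1 ++ ' ' :: suf)
    (hAB : suf = mid ∨ ∃ suf2, suf = mid ++ ' ' :: suf2) :
    pvParseOuter s pvSynonyms = pvLookupLoop s [c2, c1] := by
  have hkey : ∀ p ∈ pvFlat, pvTestA s p.2 = (p.2 == c1 || p.2 == c2) :=
    fun p hp => key_two s c1 c2 w1 mid suf hw1 hmid hc1 hc2 hcs hAB p.2 (pvClass p hp)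
  rw [parseA_eq_scan, scanF_congr s (pvTestA s) (fun t => t == c1 || t == c2) pvFlat (s, none) hkey,
    lookup_cons]
  cases hA : pvAssoc c2 pvFlat with
  | none =>
    rw [lookup_cons]
    rw [scan_eq_lookup s c1 (fun t => t == c1 || t == c2) pvFlat
      (fun p hp => by
        show (p.2 == c1 || p.2 == c2) = (p.2 == c1)
        rw [assoc_none c2 pvFlat hA p hp, Bool.or_false])]
    cases pvAssoc c1 pvFlat <;> rfl
  | some verb =>
    have hmem := assoc_some_mem c2 verb pvFlat hA
    have hspc2 : ' ' ∈ c2.toList := by rw [hc2]; simp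
    have h6 : (verb, c2) = ("move to", "move to") ∨ (verb, c2) = ("move to", "head to") ∨
        (verb, c2) = ("move to", "go to") ∨ (verb, c2) = ("move to", "walk to") ∨
        (verb, c2) = ("move to", "run to") ∨ (verb, c2) = ("take", "pick up") := by
      have hx : ∀ p ∈ pvFlat, ' ' ∈ p.2.toList →
          (p = ("move to", "move to") ∨ p = ("move to", "head to") ∨ p = ("move to", "go to") ∨
           p = ("move to", "walk to") ∨ p = ("move to", "run to") ∨ p = ("take", "pick up")) := by
        decide
      exact hx _ hmem hspc2
    rcases h6 with h | h | h | h | h | h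
    · rw [Prod.mk.injEq] at h
      obtain ⟨rfl, rfl⟩ := h
      obtain ⟨hw1e, hmide⟩ := fsu (by decide) hw1
        ((by decide : (['m','o','v','e'] : List Char) ++ ' ' :: ['t','o'] = ("move to" : String).toList).trans hc2)
      obtain rfl : c1 = "move" := String.toList_inj.mp (by rw [hc1, ← hw1e]; decide)
      rw [scan_eq_find,
        (by decide : pvFlat.find? (fun p => (fun t => t == "move" || t == "move to") p.2) = some ("move to", "move to"))]
      exact pvRetEq s "move to" "move to"
    · rw [Prod.mk.injEq] at h
      obtain ⟨rfl, rfl⟩ := h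
      obtain ⟨hw1e, hmide⟩ := fsu (by decide) hw1
        ((by decide : (['h','e','a','d'] : List Char) ++ ' ' :: ['t','o'] = ("head to" : String).toList).trans hc2)
      obtain rfl : c1 = "head" := String.toList_inj.mp (by rw [hc1, ← hw1e]; decide)
      rw [scan_eq_find,
        (by decide : pvFlat.find? (fun p => (fun t => t == "head" || t == "head to") p.2) = some ("move to", "head to"))]
      exact pvRetEq s "move to" "head to"
    · rw [Prod.mk.injEq] at h
      obtain ⟨rfl, rfl⟩ := h
      obtain ⟨hw1e, hmide⟩ := fsu (by decide) hw1
        ((by decide : (['g','o'] : List Char) ++ ' ' :: ['t','o'] = ("go to" : String).toList).trans hc2)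
      obtain rfl : c1 = "go" := String.toList_inj.mp (by rw [hc1, ← hw1e]; decide)
      rw [scan_eq_find,
        (by decide : pvFlat.find? (fun p => (fun t => t == "go" || t == "go to") p.2) = some ("move to", "go to"))]
      exact pvRetEq s "move to" "go to"
    · rw [Prod.mk.injEq] at h
      obtain ⟨rfl, rfl⟩ := h
      obtain ⟨hw1e, hmide⟩ := fsu (by decide) hw1
        ((by decide : (['w','a','l','k'] : List Char) ++ ' ' :: ['t','o'] = ("walk to" : String).toList).trans hc2)
      obtain rfl : c1 = "walk" := String.toList_inj.mp (by rw [hc1, ← hw1e]; decide)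
      rw [scan_eq_find,
        (by decide : pvFlat.find? (fun p => (fun t => t == "walk" || t == "walk to") p.2) = some ("move to", "walk to"))]
      exact pvRetEq s "move to" "walk to"
    · rw [Prod.mk.injEq] at h
      obtain ⟨rfl, rfl⟩ := h
      obtain ⟨hw1e, hmide⟩ := fsu (by decide) hw1
        ((by decide : (['r','u','n'] : List Char) ++ ' ' :: ['t','o'] = ("run to" : String).toList).trans hc2)
      obtain rfl : c1 = "run" := String.toList_inj.mp (by rw [hc1, ← hw1e]; decide)
      rw [scan_eq_find,
        (by decide : pvFlat.find? (fun p => (fun t => t == "run" || t == "run to") p.2) = some ("move to", "run to"))]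
      exact pvRetEq s "move to" "run to"
    · rw [Prod.mk.injEq] at h
      obtain ⟨rfl, rfl⟩ := h
      obtain ⟨hw1e, hmide⟩ := fsu (by decide) hw1
        ((by decide : (['p','i','c','k'] : List Char) ++ ' ' :: ['u','p'] = ("pick up" : String).toList).trans hc2)
      obtain rfl : c1 = "pick" := String.toList_inj.mp (by rw [hc1, ← hw1e]; decide)
      rw [scan_eq_find,
        (by decide : pvFlat.find? (fun p => (fun t => t == "pick" || t == "pick up") p.2) = some ("take", "pick up"))]
      exact pvRetEq s "take" "pick up"

def pvCands (s : String) : List String :=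
  if PySem.Str.find s " " == -1 then [s]
  else [if PySem.Str.findFrom s " " (PySem.Str.find s " " + 1) == -1 then s
        else PySem.Str.slice s none (some (PySem.Str.findFrom s " " (PySem.Str.find s " " + 1))),
        PySem.Str.slice s none (some (PySem.Str.find s " "))]

lemma pv_main (s : String) : pvParseOuter s pvSynonyms = pvLookupLoop s (pvCands s) := by
  by_cases hsp : ' ' ∈ s.toList
  · obtain ⟨n, suf, hfindl, hcs, hw1, hsuftl, hlen⟩ := split_at_first_space s.toList hsp
    have hfind : PySem.Str.find s " " = (n : Int) := by
      rw [PySem.Str.find_eq, (by decide : (" " : String).toList = [' ']), hfindl]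
    have hc1l : (PySem.Str.slice s none (some ((n : Nat) : Int))).toList = s.toList.take n := by
      simp [pysem]
    have hflen : n + 1 ≤ s.toList.length := hlen
    have hff : PySem.Str.findFrom s " " ((n : Int) + 1) =
        (if PySem.Chars.find suf [' '] = -1 then -1
         else ((n + 1 : Nat) : Int) + PySem.Chars.find suf [' ']) := by
      rw [PySem.Str.findFrom_eq, (by decide : (" " : String).toList = [' ']),
        (by push_cast; ring : ((n : Int) + 1) = ((n + 1 : Nat) : Int)),
        PySem.Chars.findFrom_natCast _ _ _ hflen, ← hsuftl]
    by_cases hr : ' ' ∈ suf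
    · obtain ⟨m, suf2, hfr, hsufdec, hmidns, _, hmlen⟩ := split_at_first_space suf hr
      have hj : PySem.Str.findFrom s " " ((n : Int) + 1) = ((n + 1 + m : Nat) : Int) := by
        rw [hff, hfr, if_neg (show ¬((m : Int) = -1) by omega)]
        push_cast; ring
      have hcands : pvCands s = [PySem.Str.slice s none (some ((n + 1 + m : Nat) : Int)),
          PySem.Str.slice s none (some ((n : Nat) : Int))] := by
        rw [pvCands, hfind, hj, if_neg (by simp only [beq_iff_eq]; omega), if_neg (by simp only [beq_iff_eq]; omega)]
      rw [hcands]
      refine case2_main s _ _ (s.toList.take n) (suf.take m) suf hw1 hmidns hc1l ?_ hcs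
        (Or.inr ⟨suf2, hsufdec⟩)
      have h1 : ∀ k : Nat, (PySem.Str.slice s none (some ((k : Nat) : Int))).toList =
          s.toList.take k := fun k => by simp [pysem]
      rw [h1 (n + 1 + m)]
      conv_lhs => rw [hcs]
      rw [List.take_append, List.take_of_length_le (by rw [List.length_take]; omega),
        List.length_take]
      congr 1
      rw [show n + 1 + m - min n s.toList.length = m + 1 by omega, List.take_succ_cons]
    · have hfr : PySem.Chars.find suf [' '] = -1 :=
        (PySem.Chars.find_eq_neg_one_iff _ _).mpr (by rw [List.singleton_infix_iff]; exact hr)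
      have hj : PySem.Str.findFrom s " " ((n : Int) + 1) = -1 := by rw [hff, if_pos hfr]
      have hcands : pvCands s = [s, PySem.Str.slice s none (some ((n : Nat) : Int))] := by
        rw [pvCands, hfind, hj, if_neg (by simp only [beq_iff_eq]; omega), if_pos (by simp)]
      rw [hcands]
      exact case2_main s _ s (s.toList.take n) suf suf hw1 hr hc1l hcs hcs (Or.inl rfl)
  · have hf : PySem.Str.find s " " = -1 := by
      rw [PySem.Str.find_eq, (by decide : (" " : String).toList = [' ']),
        PySem.Chars.find_eq_neg_one_iff, List.singleton_infix_iff]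
      exact hsp
    have hcands : pvCands s = [s] := by rw [pvCands, hf, if_pos (by simp)]
    rw [hcands, parseA_eq_scan, scan_eq_lookup s s (pvTestA s) pvFlat (fun p _ => key_none s hsp p.2),
      lookup_cons]
    cases pvAssoc s pvFlat <;> rfl


-- ===== VERDICT (by name: the statement is the Claim_ definition above) =====
theorem parse_action_spec : Claim_equal_parse_action := by
  intro action_string _
  unfold Spec_parse_action parse_action parse_action_alt
  exact pv_main (PySem.Str.lower (PySem.Str.strip action_string))
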